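-- pv_equiv track=rewrite | github.com/pypi-data/pypi-mirror-368 | packages/bilibili-mcp-tools/bilibili_mcp_tools-0.1.1.tar.gz/bilibili_mcp_tools-0.1.1/bilibili.py | _analyze_length_distribution
-- ===== SOURCE A (Python) =====
-- from typing import Any, Optional, Dict, List
--
-- def _analyze_length_distribution(danmakus: List[str]) -> Dict[str, int]:
--     """
--     分析弹幕长度分布。
--
--     Args:
--         danmakus: 弹幕列表
--
--     Returns:
--         长度分布统计
--     """
--     distribution = {"short": 0, "medium": 0, "long": 0}  # 短(1-5字)、中(6-15字)、长(>15字)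
--
--     for danmaku in danmakus:
--         length = len(danmaku)
--         if length <= 5:
--             distribution["short"] += 1
--         elif length <= 15:
--             distribution["medium"] += 1
--         else:
--             distribution["long"] += 1
--
--     return distribution
-- ===== SOURCE B (Python) =====
-- from typing import Any, Optional, Dict, List
--
-- def _analyze_length_distribution(danmakus: List[str]) -> Dict[str, int]:
--     short = sum(1 for d in danmakus if len(d) <= 5)
--     medium = sum(1 for d in danmakus if 6 <= len(d) <= 15)
--     long_ = sum(1 for d in danmakus if len(d) > 15)
--     return {"short": short, "medium": medium, "long": long_}
-- ===== Notes on version B (the rewrite author's own statement) =====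
-- stated objective: idiomatic
-- what changed: Replaces the single loop that mutates a three-key dict via if/elif/else with three independent generator-sum counting passes, one per length bucket, and builds the result dict once at the end.
import Mathlib
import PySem

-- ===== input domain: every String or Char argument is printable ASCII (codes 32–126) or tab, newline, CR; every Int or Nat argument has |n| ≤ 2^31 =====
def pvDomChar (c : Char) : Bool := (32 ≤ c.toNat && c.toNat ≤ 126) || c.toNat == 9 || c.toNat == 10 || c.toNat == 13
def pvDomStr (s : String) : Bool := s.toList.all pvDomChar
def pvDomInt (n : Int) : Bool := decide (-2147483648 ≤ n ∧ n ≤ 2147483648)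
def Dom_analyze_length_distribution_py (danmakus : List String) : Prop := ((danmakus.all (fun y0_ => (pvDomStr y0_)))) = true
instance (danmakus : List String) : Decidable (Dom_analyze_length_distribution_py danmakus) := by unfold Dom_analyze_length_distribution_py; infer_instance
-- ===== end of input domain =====

-- B replaces A's single dict-mutating loop with three independent counting passes (idiomatic decomposition; no speed claim).


-- ===== PORT A =====
-- literal port of A: init dict {"short":0,"medium":0,"long":0}, one loop with if/elif/else bumping a key
def analyze_length_distribution_py (danmakus : List String) : List (String × Int) :=
  let distribution : PySem.Dict String Int :=
    PySem.Dict.ofList [("short", 0), ("medium", 0), ("long", 0)]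
  let distribution := danmakus.foldl (fun dist danmaku =>
    let length := PySem.Str.len danmaku
    if length ≤ 5 then dist.modify "short" 0 (· + 1)
    else if length ≤ 15 then dist.modify "medium" 0 (· + 1)
    else dist.modify "long" 0 (· + 1)) distribution
  distribution.items

-- ===== PORT B =====
-- port of B: three independent counting passes, result assembled once
def analyze_length_distribution_py_alt (danmakus : List String) : List (String × Int) :=
  [("short", (danmakus.countP (fun d => decide (PySem.Str.len d ≤ 5)) : Int)),
   ("medium", (danmakus.countP (fun d => decide (6 ≤ PySem.Str.len d ∧ PySem.Str.len d ≤ 15)) : Int)),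
   ("long", (danmakus.countP (fun d => decide (15 < PySem.Str.len d)) : Int))]

-- ===== PRECONDITION & SPEC =====
def Spec_analyze_length_distribution_py (danmakus : List String) (out : List (String × Int)) : Prop := out = analyze_length_distribution_py_alt danmakus
instance (danmakus : List String) (out : List (String × Int)) : Decidable (Spec_analyze_length_distribution_py danmakus out) := by unfold Spec_analyze_length_distribution_py; infer_instance

-- ===== CLAIM (what is proved, stated in full; the proofs are below) =====
def Claim_equal_analyze_length_distribution_py : Prop := ∀ (danmakus : List String), Dom_analyze_length_distribution_py danmakus → Spec_analyze_length_distribution_py danmakus (analyze_length_distribution_py danmakus)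

-- ===== LEMMAS AND PROOFS =====

lemma pv_step_eval (x : String) (s m l : Int) :
    (if PySem.Str.len x ≤ 5
      then (PySem.Dict.mk [("short", s), ("medium", m), ("long", l)]).modify "short" 0 (· + 1)
      else if PySem.Str.len x ≤ 15
      then (PySem.Dict.mk [("short", s), ("medium", m), ("long", l)]).modify "medium" 0 (· + 1)
      else (PySem.Dict.mk [("short", s), ("medium", m), ("long", l)]).modify "long" 0 (· + 1))
    = if PySem.Str.len x ≤ 5 then PySem.Dict.mk [("short", s + 1), ("medium", m), ("long", l)]
      else if PySem.Str.len x ≤ 15 then PySem.Dict.mk [("short", s), ("medium", m + 1), ("long", l)]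
      else PySem.Dict.mk [("short", s), ("medium", m), ("long", l + 1)] := by
  split_ifs with h5 h15 <;> rfl

lemma pv_loop_items (xs : List String) : ∀ (s m l : Int),
    (xs.foldl (fun dist danmaku =>
      let length := PySem.Str.len danmaku
      if length ≤ 5 then dist.modify "short" 0 (· + 1)
      else if length ≤ 15 then dist.modify "medium" 0 (· + 1)
      else dist.modify "long" 0 (· + 1))
      (PySem.Dict.mk [("short", s), ("medium", m), ("long", l)])).items
    = [("short", s + (xs.countP (fun d => decide (PySem.Str.len d ≤ 5)) : Int)),
       ("medium", m + (xs.countP (fun d => decide (6 ≤ PySem.Str.len d ∧ PySem.Str.len d ≤ 15)) : Int)),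
       ("long", l + (xs.countP (fun d => decide (15 < PySem.Str.len d)) : Int))] := by
  induction xs with
  | nil => intro s m l; simp
  | cons x xs ih =>
    intro s m l
    rw [List.foldl_cons]
    simp only [pv_step_eval]
    by_cases h5 : PySem.Str.len x ≤ 5
    · have h6 : ¬ (6 ≤ PySem.Str.len x ∧ PySem.Str.len x ≤ 15) := by omega
      have hl : ¬ (15 < PySem.Str.len x) := by omega
      simp only [if_pos h5, ih, List.countP_cons]
      simp only [PySem.Str.len_eq, String.length_toList] at h5 h6 hl
      simp [h5, hl]
      omega
    · by_cases h15 : PySem.Str.len x ≤ 15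
      · have h6 : (6 ≤ PySem.Str.len x ∧ PySem.Str.len x ≤ 15) := by omega
        have hl : ¬ (15 < PySem.Str.len x) := by omega
        simp only [if_neg h5, if_pos h15, ih, List.countP_cons]
        simp only [PySem.Str.len_eq, String.length_toList] at h5 h6 hl
        simp [h5, hl]
        omega
      · have h6 : ¬ (6 ≤ PySem.Str.len x ∧ PySem.Str.len x ≤ 15) := by omega
        have hl : (15 < PySem.Str.len x) := by omega
        simp only [if_neg h5, if_neg h15, ih, List.countP_cons]
        simp only [PySem.Str.len_eq, String.length_toList] at h5 h6 hl
        simp [h5, hl]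
        omega

-- ===== VERDICT (by name: the statement is the Claim_ definition above) =====
theorem analyze_length_distribution_py_spec : Claim_equal_analyze_length_distribution_py := by
  intro danmakus _
  unfold Spec_analyze_length_distribution_py analyze_length_distribution_py analyze_length_distribution_py_alt
  have h := pv_loop_items danmakus 0 0 0
  simpa [PySem.Dict.ofList] using h
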